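-- pv_equiv track=rewrite | github.com/wahoman/algorithm_study | lv1/hall_fame.py | solution
-- ===== SOURCE A (Python) =====
-- def solution(k, score):
--     result=[]
--     lst=[]
--     for i in range(len(score)):
--         lst.append(score[i])
--         lst.sort(reverse=True)
--         if i<k:
--             result.append(lst[-1])
--         else:
--             result.append(lst[k-1])
--     return result
-- ===== SOURCE B (Python) =====
-- import bisect
--
--
-- def solution(k, score):
--     # Keep only the current top-k scores in an ascending window:
--     # its first element is the answer for each day (the lowest of the
--     # best k so far, i.e. the k-th highest once k scores have arrived).
--     top = []
--     out = []
--     for s in score: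
--         bisect.insort(top, s)
--         if len(top) > k:
--             top.pop(0)
--         out.append(top[0])
--     return out
-- ===== Notes on version B (the rewrite author's own statement) =====
-- stated objective: faster
-- what changed: Instead of appending and re-sorting the whole prefix every day, B maintains only an ascending window of the current top-k scores (binary insertion via bisect.insort, dropping the smallest on overflow) and reads its first element; Pre_ excludes k <= 0 with a nonempty score list, where A raises IndexError for k < 0 and for k = 0 accidentally returns running minima (lst[k-1] = lst[-1]) while B's empty window raises IndexError.
-- outside the precondition, e.g. on solution(0, [5]): A returns [5], B raises IndexError
import Mathlib
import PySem

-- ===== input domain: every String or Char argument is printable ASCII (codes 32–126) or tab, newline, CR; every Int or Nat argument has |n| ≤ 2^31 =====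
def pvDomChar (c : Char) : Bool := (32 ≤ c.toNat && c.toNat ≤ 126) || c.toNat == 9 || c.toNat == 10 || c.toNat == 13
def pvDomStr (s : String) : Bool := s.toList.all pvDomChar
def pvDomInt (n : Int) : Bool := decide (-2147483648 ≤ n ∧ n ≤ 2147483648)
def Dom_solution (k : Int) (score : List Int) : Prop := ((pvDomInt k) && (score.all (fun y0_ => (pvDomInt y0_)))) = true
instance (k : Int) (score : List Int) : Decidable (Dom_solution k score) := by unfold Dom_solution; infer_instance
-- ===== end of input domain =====

-- B replaces A's per-day full re-sort of the prefix by an ascending window of the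
-- current top-k scores (binary insertion, drop the smallest on overflow): a different
-- faster algorithm that never touches elements below the k-th; return values proved equal on Pre_.

-- ===== PORT A =====
def solution (k : Int) (score : List Int) : List Int :=
  ((PySem.List.pyRange 0 (score.length : Int) 1).foldl
    (fun (st : List Int × List Int) i =>
      let lst := PySem.List.sorted (st.2 ++ [PySem.List.pyGetD score i 0]) (fun x => x) true
      let result :=
        if i < k then st.1 ++ [PySem.List.pyGetD lst (-1) 0]
        else st.1 ++ [PySem.List.pyGetD lst (k - 1) 0]
      (result, lst))
    ([], [])).1

-- ===== PORT B =====
-- bisect.insort = PySem.List.insertBy (insert before the first strictly greater element)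
def solution_alt (k : Int) (score : List Int) : List Int :=
  (score.foldl
    (fun (st : List Int × List Int) s =>
      let top0 := PySem.List.insertBy (fun a b => decide (a < b)) s st.1
      let top := if (top0.length : Int) > k then top0.drop 1 else top0
      (top, st.2 ++ [PySem.List.pyGetD top 0 0]))
    ([], [])).2

-- ===== PRECONDITION & SPEC =====
-- Pre_ excludes k ≤ 0 with a nonempty score list: there A raises an IndexError for
-- k < 0, and for k = 0 A returns running minima (an accident of lst[k-1] = lst[-1])
-- while B's window is empty and its top[0] raises an IndexError.
def Pre_solution (k : Int) (score : List Int) : Prop := 1 ≤ k ∨ score = []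
instance (k : Int) (score : List Int) : Decidable (Pre_solution k score) := by unfold Pre_solution; infer_instance
def pvWitness_solution : Int × List Int := (2, [3, 1, 4, 1, 5])

def Spec_solution (k : Int) (score : List Int) (out : List Int) : Prop := out = solution_alt k score
instance (k : Int) (score : List Int) (out : List Int) : Decidable (Spec_solution k score out) := by unfold Spec_solution; infer_instance

-- ===== CLAIM =====
def Claim_equal_solution : Prop := ∀ (k : Int) (score : List Int), Dom_solution k score → Pre_solution k score → Spec_solution k score (solution k score)

-- ===== LEMMAS AND PROOFS =====

-- shorthand used only by the proofs
def pvIns (s : Int) (l : List Int) : List Int := PySem.List.insertBy (fun a b => decide (a < b)) s l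
def pvAsc (p : List Int) : List Int := PySem.List.sorted p (fun x => x) false
-- the common per-day answer: entry at index (length - k) of the ascending sort of the prefix
def pvOut (κ : Nat) (q : List Int) : List Int := (List.range q.length).map (fun j => ((pvAsc (q.take (j+1))).drop (j + 1 - κ)).getD 0 0)

lemma pvAsc_concat (p : List Int) (s : Int) : pvAsc (p ++ [s]) = pvIns s (pvAsc p) := by
  simp [pvAsc, pvIns, PySem.List.sorted_eq_foldl_insertBy]

lemma pvAsc_perm (p : List Int) : (pvAsc p).Perm p := PySem.List.sorted_perm p _ _

lemma pvAsc_length (p : List Int) : (pvAsc p).length = p.length := (pvAsc_perm p).length_eq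

lemma pvAsc_pairwise (p : List Int) : (pvAsc p).Pairwise (· ≤ ·) := PySem.List.sorted_pairwise p _

lemma pvIns_perm (s : Int) (l : List Int) : (pvIns s l).Perm (s :: l) := by
  induction l with
  | nil => simp [pvIns, PySem.List.insertBy]
  | cons b l ih =>
    simp only [pvIns, PySem.List.insertBy] at *
    split
    · exact List.Perm.refl _
    · exact (List.Perm.cons b ih).trans (List.Perm.swap _ _ _)

lemma pvIns_length (s : Int) (l : List Int) : (pvIns s l).length = l.length + 1 := by
  simpa using (pvIns_perm s l).length_eq

lemma pvIns_of_lt_head (s : Int) (l : List Int) (h : ∀ y ∈ l, s < y) : pvIns s l = s :: l := by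
  cases l with
  | nil => simp [pvIns, PySem.List.insertBy]
  | cons b l => simp [pvIns, PySem.List.insertBy, h b (by simp)]

-- the heap/window step: inserting into a suffix then popping the minimum equals
-- inserting into the whole sorted list and dropping one more element
lemma pvIns_drop (u : List Int) (t : Nat) (s : Int) (hu : u.Pairwise (· ≤ ·)) :
    (pvIns s (u.drop t)).drop 1 = (pvIns s u).drop (t + 1) := by
  induction u generalizing t with
  | nil => simp [pvIns, PySem.List.insertBy]
  | cons b u ih =>
    cases t with
    | zero => simp
    | succ t =>
      have hbu : ∀ y ∈ u, b ≤ y := (List.pairwise_cons.mp hu).1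
      have hu' : u.Pairwise (· ≤ ·) := (List.pairwise_cons.mp hu).2
      simp only [List.drop_succ_cons]
      by_cases hs : s < b
      · have h1 : pvIns s (u.drop t) = s :: u.drop t := by
          apply pvIns_of_lt_head
          intro y hy
          exact lt_of_lt_of_le hs (hbu y (List.mem_of_mem_drop hy))
        have h2 : pvIns s (b :: u) = s :: b :: u := by
          apply pvIns_of_lt_head
          intro y hy
          rcases List.mem_cons.mp hy with h | h
          · exact h ▸ hs
          · exact lt_of_lt_of_le hs (hbu y h)
        simp [h1, h2]
      · have h2 : pvIns s (b :: u) = b :: pvIns s u := by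
          simp [pvIns, PySem.List.insertBy, hs]
        rw [h2]
        simpa using ih t hu'

-- uniqueness of a descending sorted rearrangement (identity values)
lemma pvSortedRev_eq (xs ys : List Int) (hperm : ys.Perm xs)
    (hpw : ys.Pairwise (fun a b => b ≤ a)) :
    PySem.List.sorted xs (fun x => x) true = ys := by
  exact List.Perm.eq_of_pairwise (fun a b _ _ h1 h2 => le_antisymm h2 h1)
    (PySem.List.sorted_pairwise_rev xs _) hpw
    ((PySem.List.sorted_perm xs _ _).trans hperm.symm)

lemma pvSortedRev_concat (p : List Int) (s : Int) :
    PySem.List.sorted ((pvAsc p).reverse ++ [s]) (fun x => x) true = (pvAsc (p ++ [s])).reverse := by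
  apply pvSortedRev_eq
  · have h1 : (pvAsc (p ++ [s])).reverse.Perm (p ++ [s]) :=
      (List.reverse_perm _).trans (pvAsc_perm _)
    have h2 : ((pvAsc p).reverse ++ [s]).Perm (p ++ [s]) :=
      List.Perm.append_right [s] ((List.reverse_perm _).trans (pvAsc_perm p))
    exact h1.trans h2.symm
  · rw [List.pairwise_reverse]
    exact pvAsc_pairwise _

-- ===== main characterisations =====

lemma pvOut_concat (κ : Nat) (q : List Int) (s : Int) :
    pvOut κ (q ++ [s]) = pvOut κ q ++ [((pvAsc (q ++ [s])).drop (q.length + 1 - κ)).getD 0 0] := by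
  simp only [pvOut, List.length_append, List.length_cons, List.length_nil, Nat.zero_add,
    List.range_succ, List.map_append, List.map_cons, List.map_nil]
  congr 1
  · apply List.map_congr_left
    intro j hj
    have hj' : j + 1 ≤ q.length := List.mem_range.mp hj
    rw [List.take_append_of_le_length hj']
  · rw [List.take_of_length_le (by simp)]

lemma pvGetD_zero_head (l : List Int) (h : l ≠ []) : l.getD 0 0 = l.head h := by
  cases l with
  | nil => exact absurd rfl h
  | cons a l => simp [List.getD]

-- B's fold state after processing prefix q
lemma B_state (k : Int) (hk : 1 ≤ k) (q : List Int) :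
    q.foldl
      (fun (st : List Int × List Int) s =>
        let top0 := PySem.List.insertBy (fun a b => decide (a < b)) s st.1
        let top := if (top0.length : Int) > k then top0.drop 1 else top0
        (top, st.2 ++ [PySem.List.pyGetD top 0 0]))
      ([], [])
    = ((pvAsc q).drop (q.length - k.toNat), pvOut k.toNat q) := by
  induction q using List.reverseRecOn with
  | nil => simp [pvAsc, pvOut, PySem.List.sorted]
  | append_singleton q s ih =>
    rw [List.foldl_append, ih]
    simp only [List.foldl_cons, List.foldl_nil]
    have hlen0 : (PySem.List.insertBy (fun a b => decide (a < b)) s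
        ((pvAsc q).drop (q.length - k.toNat))).length
        = min q.length k.toNat + 1 := by
      have := pvIns_length s ((pvAsc q).drop (q.length - k.toNat))
      simp only [pvIns] at this
      rw [this, List.length_drop, pvAsc_length]
      omega
    by_cases hcase : k.toNat ≤ q.length
    · have hcond : ((PySem.List.insertBy (fun a b => decide (a < b)) s
          ((pvAsc q).drop (q.length - k.toNat))).length : Int) > k := by
        rw [hlen0]; omega
      have htop : (PySem.List.insertBy (fun a b => decide (a < b)) s
          ((pvAsc q).drop (q.length - k.toNat))).drop 1
          = (pvAsc (q ++ [s])).drop ((q ++ [s]).length - k.toNat) := by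
        have hstep := pvIns_drop (pvAsc q) (q.length - k.toNat) s (pvAsc_pairwise q)
        simp only [pvIns] at hstep
        have hconc : PySem.List.insertBy (fun a b => decide (a < b)) s (pvAsc q)
            = pvAsc (q ++ [s]) := by rw [pvAsc_concat]; rfl
        rw [hstep, hconc]
        congr 1
        simp only [List.length_append, List.length_cons, List.length_nil]
        omega
      rw [if_pos hcond, htop, pvOut_concat]
      simp only [List.length_append, List.length_cons, List.length_nil, Prod.mk.injEq]
      refine ⟨trivial, ?_⟩
      rw [PySem.List.pyGetD_zero]
    · have hcond : ¬ ((PySem.List.insertBy (fun a b => decide (a < b)) s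
          ((pvAsc q).drop (q.length - k.toNat))).length : Int) > k := by
        rw [hlen0]; omega
      have hdq : q.length - k.toNat = 0 := by omega
      have htop : PySem.List.insertBy (fun a b => decide (a < b)) s
          ((pvAsc q).drop (q.length - k.toNat))
          = (pvAsc (q ++ [s])).drop ((q ++ [s]).length - k.toNat) := by
        rw [hdq, List.drop_zero]
        have hconc : PySem.List.insertBy (fun a b => decide (a < b)) s (pvAsc q)
            = pvAsc (q ++ [s]) := by rw [pvAsc_concat]; rfl
        rw [hconc]
        have : (q ++ [s]).length - k.toNat = 0 := by
          simp only [List.length_append, List.length_cons, List.length_nil]; omega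
        rw [this, List.drop_zero]
      rw [if_neg hcond, htop, pvOut_concat]
      simp only [List.length_append, List.length_cons, List.length_nil, Prod.mk.injEq]
      refine ⟨trivial, ?_⟩
      rw [PySem.List.pyGetD_zero]

-- A's fold state after the first n iterations
lemma A_state (k : Int) (hk : 1 ≤ k) (score : List Int) (n : Nat) (hn : n ≤ score.length) :
    ((List.range n).foldl
      (fun (st : List Int × List Int) (j : Nat) =>
        let lst := PySem.List.sorted (st.2 ++ [PySem.List.pyGetD score (j : Int) 0]) (fun x => x) true
        let result :=
          if (j : Int) < k then st.1 ++ [PySem.List.pyGetD lst (-1) 0]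
          else st.1 ++ [PySem.List.pyGetD lst (k - 1) 0]
        (result, lst))
      ([], []))
    = (pvOut k.toNat (score.take n), (pvAsc (score.take n)).reverse) := by
  induction n with
  | zero => simp [pvAsc, pvOut, PySem.List.sorted]
  | succ n ih =>
    have hn' : n < score.length := hn
    rw [List.range_succ, List.foldl_append, ih (by omega)]
    simp only [List.foldl_cons, List.foldl_nil]
    have hx : PySem.List.pyGetD score (n : Int) 0 = score[n] := by
      rw [PySem.List.pyGetD_natCast]
      exact List.getD_eq_getElem score 0 hn'
    have htake : score.take n ++ [score[n]] = score.take (n + 1) := by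
      rw [List.take_add_one]
      congr 1
      simp [List.getElem?_eq_getElem hn']
    have hlst : PySem.List.sorted ((pvAsc (score.take n)).reverse ++ [PySem.List.pyGetD score (n : Int) 0]) (fun x => x) true
        = (pvAsc (score.take (n + 1))).reverse := by
      rw [hx, pvSortedRev_concat, htake]
    rw [hlst]
    have hlen1 : (pvAsc (score.take (n + 1))).length = n + 1 := by
      rw [pvAsc_length, List.length_take]
      omega
    have hne : (pvAsc (score.take (n + 1))).reverse ≠ [] := by
      intro hc
      have := congrArg List.length hc
      simp [hlen1] at this
    have hout : pvOut k.toNat (score.take (n + 1))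
        = pvOut k.toNat (score.take n)
          ++ [((pvAsc (score.take (n + 1))).drop (n + 1 - k.toNat)).getD 0 0] := by
      rw [← htake, pvOut_concat, htake,
        show (score.take n).length = n from by rw [List.length_take]; omega]
    by_cases hbr : (n : Int) < k
    · rw [if_pos hbr, hout]
      simp only [Prod.mk.injEq]
      refine ⟨?_, trivial⟩
      congr 2
      rw [PySem.List.pyGetD_neg_one _ _ hne]
      have h0 : n + 1 - k.toNat = 0 := by omega
      rw [h0, List.drop_zero]
      rw [List.getLast_reverse, pvGetD_zero_head]
    · rw [if_neg hbr, hout]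
      simp only [Prod.mk.injEq]
      refine ⟨?_, trivial⟩
      congr 2
      have hk1 : 0 ≤ k - 1 := by omega
      have hk2 : k - 1 < ((pvAsc (score.take (n + 1))).reverse.length : Int) := by
        rw [List.length_reverse, hlen1]; omega
      rw [PySem.List.pyGetD_eq_getElem _ 0 hk1 hk2]
      rw [List.getElem_reverse]
      have hdl : n + 1 - k.toNat < (pvAsc (score.take (n + 1))).length := by
        rw [hlen1]; omega
      have hgd : ((pvAsc (score.take (n + 1))).drop (n + 1 - k.toNat)).getD 0 0
          = (pvAsc (score.take (n + 1)))[n + 1 - k.toNat] := by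
        simp only [List.getD_eq_getElem?_getD, List.getElem?_drop, Nat.add_zero,
          List.getElem?_eq_getElem hdl, Option.getD_some]
      rw [hgd]
      congr 1
      rw [hlen1]
      omega

-- ===== VERDICT =====
theorem solution_spec : Claim_equal_solution := by
  intro k score _ hpre
  unfold Spec_solution
  rcases hpre with hk | hnil
  · unfold solution solution_alt
    rw [B_state k hk score]
    rw [PySem.List.pyRange_one]
    simp only [Int.sub_zero, Int.toNat_natCast, List.foldl_map, Int.zero_add]
    rw [A_state k hk score score.length (le_refl _)]
    simp
  · subst hnil
    simp [solution, solution_alt]
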